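-- pv_equiv track=rewrite | github.com/kkourin/ShantenPyBinding | ShantenPythonTest/ShantenPythonTest.py | parseTenhouHand
-- ===== SOURCE A (Python) =====
-- def parseTenhouHand(hand):
--     buffer = []
--     output = [0 for _ in range(34)]
--     offset = 0
--     offsets = {'m':0, 'p':9, 's':18, 'z':27}
--     for c in hand:
--         if c in offsets:
--             offset = offsets[c]
--             for b in buffer:
--                 output[b-1+offset] += 1
--             buffer = []
--         else:
--             if c == '0':
--                 c = '5'
--             buffer.append(int(c))
--     return output
-- ===== SOURCE B (Python) =====
-- def parseTenhouHand(hand):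
--     offsets = {'m': 0, 'p': 9, 's': 18, 'z': 27}
--     output = [0] * 34
--     offset = None
--     for c in reversed(hand):
--         if c in offsets:
--             offset = offsets[c]
--         else:
--             d = 5 if c == '0' else int(c)
--             if offset is not None:
--                 output[d - 1 + offset] += 1
--     return output
-- ===== Notes on version B (the rewrite author's own statement) =====
-- stated objective: simpler
-- what changed: Replaces A's buffer-and-flush two-phase loop (collect digits, flush them when a suit letter arrives) by a single right-to-left pass with no buffer: each digit is counted immediately under the suit letter most recently seen, i.e. the nearest suit to its right.
import Mathlib
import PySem

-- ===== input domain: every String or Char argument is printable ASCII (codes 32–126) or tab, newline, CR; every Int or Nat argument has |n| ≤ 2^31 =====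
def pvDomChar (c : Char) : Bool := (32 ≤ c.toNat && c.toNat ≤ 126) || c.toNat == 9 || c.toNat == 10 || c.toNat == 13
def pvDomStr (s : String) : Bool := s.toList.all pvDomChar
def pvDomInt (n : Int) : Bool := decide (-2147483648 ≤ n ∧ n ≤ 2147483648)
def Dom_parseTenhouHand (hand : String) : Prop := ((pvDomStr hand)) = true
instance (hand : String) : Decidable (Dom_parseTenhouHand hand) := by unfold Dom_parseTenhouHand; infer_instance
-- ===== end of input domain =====

-- B replaces A's buffer-and-flush two-phase loop by a single right-to-left pass that pairs each
-- digit with the suit letter nearest to its right; same exact results on Pre_ (where A returns).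

-- ===== PORT A =====
def suitOffsets : List (Char × Int) := [('m', 0), ('p', 9), ('s', 18), ('z', 27)]

def parseStepA (st : List Int × List Int) (c : Char) : List Int × List Int :=
  match suitOffsets.lookup c with
  | some off =>
      ([], st.1.foldl (fun out b =>
          PySem.List.pySetD out (b - 1 + off) (PySem.List.pyGetD out (b - 1 + off) 0 + 1)) st.2)
  | none =>
      let c' := if c = '0' then '5' else c
      (st.1 ++ [(PySem.Int.ofChars? [c']).getD 0], st.2)

def parseTenhouHand (hand : String) : List Int :=
  (hand.toList.foldl parseStepA ([], List.replicate 34 0)).2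

-- ===== PORT B =====
def parseStepB (st : Option Int × List Int) (c : Char) : Option Int × List Int :=
  match suitOffsets.lookup c with
  | some off => (some off, st.2)
  | none =>
      let d : Int := if c = '0' then 5 else (PySem.Int.ofChars? [c]).getD 0
      match st.1 with
      | some off => (st.1, PySem.List.pySetD st.2 (d - 1 + off) (PySem.List.pyGetD st.2 (d - 1 + off) 0 + 1))
      | none => st

def parseTenhouHand_alt (hand : String) : List Int :=
  (hand.toList.reverse.foldl parseStepB (none, List.replicate 34 0)).2

-- ===== PRECONDITION & SPEC =====
-- Pre_ excludes exactly the inputs on which the Python A raises: a character that is neither an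
-- ASCII digit nor a suit letter (int(c) raises ValueError), and a digit '8'/'9' whose nearest suit
-- letter to the right is 'z' (output[b-1+27] raises IndexError).
def isSuit (c : Char) : Bool := c == 'm' || c == 'p' || c == 's' || c == 'z'
def Pre_parseTenhouHand (hand : String) : Prop :=
  (hand.toList.all fun c => c.isDigit || isSuit c) = true ∧
  ((List.range hand.toList.length).all fun i =>
    (List.range hand.toList.length).all fun j =>
      !(decide (i < j) &&
        (hand.toList.getD i ' ' == '8' || hand.toList.getD i ' ' == '9') &&
        hand.toList.getD j ' ' == 'z' &&
        ((List.range j).all fun k => !(decide (i < k) && isSuit (hand.toList.getD k ' '))))) = true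
instance (hand : String) : Decidable (Pre_parseTenhouHand hand) := by
  unfold Pre_parseTenhouHand; infer_instance
def pvWitness_parseTenhouHand : String := "123m055z77p9s"

def Spec_parseTenhouHand (hand : String) (out : List Int) : Prop := out = parseTenhouHand_alt hand
instance (hand : String) (out : List Int) : Decidable (Spec_parseTenhouHand hand out) := by unfold Spec_parseTenhouHand; infer_instance

-- ===== CLAIM (what is proved, stated in full; the proofs are below) =====
def Claim_equal_parseTenhouHand : Prop := ∀ (hand : String), Dom_parseTenhouHand hand → Pre_parseTenhouHand hand → Spec_parseTenhouHand hand (parseTenhouHand hand)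

-- ===== LEMMAS AND PROOFS =====

-- one Python 'output[i] += 1' (the common increment both ports perform)
def inc (o : List Int) (i : Int) : List Int :=
  PySem.List.pySetD o i (PySem.List.pyGetD o i 0 + 1)

-- inc via its canonical Nat index
def incN (o : List Int) (k : Nat) : List Int := o.set k (o[k]?.getD 0 + 1)

lemma inc_eq (o : List Int) (i : Int) :
    inc o i = match PySem.List.pyIdx? o.length i with
              | none => o
              | some k => incN o k := by
  unfold inc incN PySem.List.pySetD PySem.List.pySet? PySem.List.pyGetD PySem.List.pyGet?
  cases PySem.List.pyIdx? o.length i <;> rfl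

lemma incN_length (o : List Int) (k : Nat) : (incN o k).length = o.length := by
  simp [incN]

lemma incN_comm (o : List Int) (k₁ k₂ : Nat) : incN (incN o k₁) k₂ = incN (incN o k₂) k₁ := by
  by_cases h : k₁ = k₂
  · subst h; rfl
  · simp only [incN, List.getElem?_set_ne h, List.getElem?_set_ne (Ne.symm h)]
    exact List.set_comm _ _ h

lemma inc_of_none (o : List Int) (i : Int) (h : PySem.List.pyIdx? o.length i = none) :
    inc o i = o := by rw [inc_eq, h]

lemma inc_of_some (o : List Int) (i : Int) (k : Nat)
    (h : PySem.List.pyIdx? o.length i = some k) : inc o i = incN o k := by rw [inc_eq, h]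

lemma inc_comm (o : List Int) (i j : Int) : inc (inc o i) j = inc (inc o j) i := by
  cases h₁ : PySem.List.pyIdx? o.length i with
  | none =>
    cases h₂ : PySem.List.pyIdx? o.length j with
    | none => rw [inc_of_none o i h₁, inc_of_none o j h₂, inc_of_none o i h₁]
    | some k₂ =>
      have hi : PySem.List.pyIdx? (incN o k₂).length i = none := by rw [incN_length]; exact h₁
      rw [inc_of_none o i h₁, inc_of_some o j k₂ h₂, inc_of_none _ i hi]
  | some k₁ =>
    cases h₂ : PySem.List.pyIdx? o.length j with
    | none =>
      have hj : PySem.List.pyIdx? (incN o k₁).length j = none := by rw [incN_length]; exact h₂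
      rw [inc_of_some o i k₁ h₁, inc_of_none _ j hj, inc_of_none o j h₂, inc_of_some o i k₁ h₁]
    | some k₂ =>
      have hj : PySem.List.pyIdx? (incN o k₁).length j = some k₂ := by rw [incN_length]; exact h₂
      have hi : PySem.List.pyIdx? (incN o k₂).length i = some k₁ := by rw [incN_length]; exact h₁
      rw [inc_of_some o i k₁ h₁, inc_of_some _ j k₂ hj, inc_of_some o j k₂ h₂,
        inc_of_some _ i k₁ hi]
      exact incN_comm o k₁ k₂

lemma foldl_inc_push (l : List Int) (o : List Int) (i : Int) :
    l.foldl inc (inc o i) = inc (l.foldl inc o) i := by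
  induction l generalizing o with
  | nil => rfl
  | cons c t ih => simp only [List.foldl_cons, inc_comm o i c, ih]

lemma foldl_inc_reverse (l : List Int) (o : List Int) :
    l.reverse.foldl inc o = l.foldl inc o := by
  induction l generalizing o with
  | nil => rfl
  | cons c t ih =>
    simp only [List.reverse_cons, List.foldl_append, List.foldl_cons, List.foldl_nil, ih]
    rw [← foldl_inc_push]

-- the digit value A and B both extract from a non-suit character
def dig (c : Char) : Int := if c = '0' then 5 else (PySem.Int.ofChars? [c]).getD 0

lemma digA_eq (c : Char) :
    (PySem.Int.ofChars? [if c = '0' then '5' else c]).getD 0 = dig c := by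
  unfold dig
  by_cases h : c = '0'
  · simp [h]; rfl
  · simp [h]

-- the sequence of increment indices A performs, left to right
def seqA : List Int → List Char → List Int
  | _, [] => []
  | buf, c :: t =>
    match suitOffsets.lookup c with
    | some off => buf.map (fun b => b - 1 + off) ++ seqA [] t
    | none => seqA (buf ++ [dig c]) t

lemma A_fold (l : List Char) : ∀ (buf out : List Int),
    (l.foldl parseStepA (buf, out)).2 = (seqA buf l).foldl inc out := by
  induction l with
  | nil => intro buf out; rfl
  | cons c t ih =>
    intro buf out
    simp only [List.foldl_cons, seqA]
    cases h : suitOffsets.lookup c with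
    | some off =>
      simp only [parseStepA, h, ih, List.foldl_append, List.foldl_map]
      rfl
    | none =>
      simp only [parseStepA, h, ih, digA_eq]

-- the suit offset applying at the left end of a suffix (nearest suit to the right), if any
def fsOff : List Char → Option Int
  | [] => none
  | c :: t =>
    match suitOffsets.lookup c with
    | some off => some off
    | none => fsOff t

-- the sequence of increment indices B performs, innermost (rightmost character) first
def seqB : List Char → List Int
  | [] => []
  | c :: t =>
    match suitOffsets.lookup c with
    | some _ => seqB t
    | none =>
      seqB t ++ (match fsOff t with
                 | some off => [dig c - 1 + off]
                 | none => [])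

lemma B_fst (l : List Char) (out0 : List Int) :
    (l.foldr (fun c st => parseStepB st c) (none, out0)).1 = fsOff l := by
  induction l with
  | nil => rfl
  | cons c t ih =>
    rw [List.foldr_cons]
    cases hR : List.foldr (fun c st => parseStepB st c) (none, out0) t with
    | mk f2 o2 =>
      rw [hR] at ih
      cases h : suitOffsets.lookup c with
      | some off => simp [parseStepB, h, fsOff]
      | none =>
        simp only [parseStepB, h, fsOff]
        cases f2 <;> simpa using ih

lemma B_fold (l : List Char) (out0 : List Int) :
    (l.foldr (fun c st => parseStepB st c) (none, out0)).2 = (seqB l).foldl inc out0 := by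
  induction l with
  | nil => rfl
  | cons c t ih =>
    rw [List.foldr_cons]
    have hfst := B_fst t out0
    cases hR : List.foldr (fun c st => parseStepB st c) (none, out0) t with
    | mk f2 o2 =>
      rw [hR] at ih hfst
      cases h : suitOffsets.lookup c with
      | some off => simpa [parseStepB, h, seqB] using ih
      | none =>
        simp only [parseStepB, h, seqB]
        cases h2 : fsOff t with
        | some off =>
          have hf : f2 = some off := by rw [← hfst] at h2; exact h2
          subst hf
          simp only [List.foldl_append, List.foldl_cons, List.foldl_nil, ← ih]
          rfl
        | none =>
          have hf : f2 = none := by rw [← hfst] at h2; exact h2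
          subst hf
          simpa using ih

-- bridge: A's index sequence is B's read backwards (plus the pending buffer resolved at the next suit)
lemma bridge (t : List Char) : ∀ (buf : List Int),
    seqA buf t = (match fsOff t with
                  | some off => buf.map (fun b => b - 1 + off)
                  | none => []) ++ (seqB t).reverse := by
  induction t with
  | nil => intro buf; rfl
  | cons c t ih =>
    intro buf
    simp only [seqA, seqB, fsOff]
    cases h : suitOffsets.lookup c with
    | some off =>
      rw [ih []]
      cases fsOff t <;> simp
    | none =>
      rw [ih (buf ++ [dig c])]
      cases fsOff t <;> simp

-- ===== VERDICT (by name: the statement is the Claim_ definition above) =====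
theorem parseTenhouHand_spec : Claim_equal_parseTenhouHand := by
  intro hand _ _
  unfold Spec_parseTenhouHand parseTenhouHand parseTenhouHand_alt
  rw [List.foldl_reverse]
  have hB : (hand.toList.foldr (fun c st => parseStepB st c) (none, List.replicate 34 0)).2
      = (seqB hand.toList).foldl inc (List.replicate 34 0) := B_fold _ _
  have hA : (hand.toList.foldl parseStepA ([], List.replicate 34 0)).2
      = (seqA [] hand.toList).foldl inc (List.replicate 34 0) := A_fold _ _ _
  rw [hA, hB, bridge hand.toList []]
  cases fsOff hand.toList <;>
    simp only [List.map_nil, List.nil_append, foldl_inc_reverse]
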